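-- pv_equiv track=rewrite | github.com/drazzam/erdts-synthea-pipeline | etl/mappers.py | _categorize_drug
-- ===== SOURCE A (Python) =====
-- def _categorize_drug(description: str) -> str:
--     """Categorize a drug based on its description."""
--     desc_lower = description.lower()
--
--     drug_classes = [
--         (["lisinopril", "enalapril", "ramipril", "captopril", "benazepril"], "ACE Inhibitor"),
--         (["losartan", "valsartan", "irbesartan", "olmesartan", "candesartan"], "ARB"),
--         (["metoprolol", "atenolol", "carvedilol", "propranolol", "bisoprolol"], "Beta Blocker"),
--         (["amlodipine", "nifedipine", "diltiazem", "verapamil"], "Calcium Channel Blocker"),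
--         (["hydrochlorothiazide", "furosemide", "spironolactone", "chlorthalidone", "bumetanide"], "Diuretic"),
--         (["atorvastatin", "simvastatin", "rosuvastatin", "pravastatin", "lovastatin"], "Statin"),
--         (["metformin", "glipizide", "glyburide", "pioglitazone", "sitagliptin", "empagliflozin"], "Antidiabetic"),
--         (["insulin"], "Insulin"),
--         (["warfarin", "apixaban", "rivaroxaban", "dabigatran", "heparin", "enoxaparin"], "Anticoagulant"),
--         (["aspirin", "clopidogrel", "ticagrelor", "prasugrel"], "Antiplatelet"),
--         (["omeprazole", "pantoprazole", "esomeprazole", "lansoprazole", "rabeprazole"], "Proton Pump Inhibitor"),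
--         (["sertraline", "fluoxetine", "escitalopram", "citalopram", "paroxetine"], "SSRI Antidepressant"),
--         (["gabapentin", "pregabalin", "topiramate", "levetiracetam", "carbamazepine", "phenytoin", "valproic"], "Anticonvulsant"),
--         (["albuterol", "salbutamol", "ipratropium", "tiotropium", "budesonide", "fluticasone"], "Respiratory"),
--         (["penicillin", "amoxicillin", "azithromycin", "ciprofloxacin", "levofloxacin", "doxycycline", "cephalexin"], "Antibiotic"),
--         (["acetaminophen", "ibuprofen", "naproxen", "diclofenac", "meloxicam", "celecoxib"], "Analgesic/NSAID"),
--         (["oxycodone", "hydrocodone", "morphine", "fentanyl", "tramadol", "codeine"], "Opioid"),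
--         (["levothyroxine", "synthroid"], "Thyroid Hormone"),
--         (["prednisone", "methylprednisolone", "dexamethasone", "hydrocortisone"], "Corticosteroid"),
--         (["contraceptive", "levonorgestrel", "ethinyl estradiol", "norethindrone"], "Contraceptive"),
--     ]
--
--     for keywords, drug_class in drug_classes:
--         if any(kw in desc_lower for kw in keywords):
--             return drug_class
--
--     return "Other"
-- ===== SOURCE B (Python) =====
-- # B: one flat keyword->class-index scan taking the minimum matched index, instead of A's ordered nested loops with early return.
--
-- _CLASS_NAMES = ['ACE Inhibitor', 'ARB', 'Beta Blocker', 'Calcium Channel Blocker', 'Diuretic', 'Statin', 'Antidiabetic', 'Insulin', 'Anticoagulant', 'Antiplatelet', 'Proton Pump Inhibitor', 'SSRI Antidepressant', 'Anticonvulsant', 'Respiratory', 'Antibiotic', 'Analgesic/NSAID', 'Opioid', 'Thyroid Hormone', 'Corticosteroid', 'Contraceptive']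
--
-- _KEYWORD_INDEX = [
--     ('lisinopril', 0),
--     ('enalapril', 0),
--     ('ramipril', 0),
--     ('captopril', 0),
--     ('benazepril', 0),
--     ('losartan', 1),
--     ('valsartan', 1),
--     ('irbesartan', 1),
--     ('olmesartan', 1),
--     ('candesartan', 1),
--     ('metoprolol', 2),
--     ('atenolol', 2),
--     ('carvedilol', 2),
--     ('propranolol', 2),
--     ('bisoprolol', 2),
--     ('amlodipine', 3),
--     ('nifedipine', 3),
--     ('diltiazem', 3),
--     ('verapamil', 3),
--     ('hydrochlorothiazide', 4),
--     ('furosemide', 4),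
--     ('spironolactone', 4),
--     ('chlorthalidone', 4),
--     ('bumetanide', 4),
--     ('atorvastatin', 5),
--     ('simvastatin', 5),
--     ('rosuvastatin', 5),
--     ('pravastatin', 5),
--     ('lovastatin', 5),
--     ('metformin', 6),
--     ('glipizide', 6),
--     ('glyburide', 6),
--     ('pioglitazone', 6),
--     ('sitagliptin', 6),
--     ('empagliflozin', 6),
--     ('insulin', 7),
--     ('warfarin', 8),
--     ('apixaban', 8),
--     ('rivaroxaban', 8),
--     ('dabigatran', 8),
--     ('heparin', 8),
--     ('enoxaparin', 8),
--     ('aspirin', 9),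
--     ('clopidogrel', 9),
--     ('ticagrelor', 9),
--     ('prasugrel', 9),
--     ('omeprazole', 10),
--     ('pantoprazole', 10),
--     ('esomeprazole', 10),
--     ('lansoprazole', 10),
--     ('rabeprazole', 10),
--     ('sertraline', 11),
--     ('fluoxetine', 11),
--     ('escitalopram', 11),
--     ('citalopram', 11),
--     ('paroxetine', 11),
--     ('gabapentin', 12),
--     ('pregabalin', 12),
--     ('topiramate', 12),
--     ('levetiracetam', 12),
--     ('carbamazepine', 12),
--     ('phenytoin', 12),
--     ('valproic', 12),
--     ('albuterol', 13),
--     ('salbutamol', 13),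
--     ('ipratropium', 13),
--     ('tiotropium', 13),
--     ('budesonide', 13),
--     ('fluticasone', 13),
--     ('penicillin', 14),
--     ('amoxicillin', 14),
--     ('azithromycin', 14),
--     ('ciprofloxacin', 14),
--     ('levofloxacin', 14),
--     ('doxycycline', 14),
--     ('cephalexin', 14),
--     ('acetaminophen', 15),
--     ('ibuprofen', 15),
--     ('naproxen', 15),
--     ('diclofenac', 15),
--     ('meloxicam', 15),
--     ('celecoxib', 15),
--     ('oxycodone', 16),
--     ('hydrocodone', 16),
--     ('morphine', 16),
--     ('fentanyl', 16),
--     ('tramadol', 16),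
--     ('codeine', 16),
--     ('levothyroxine', 17),
--     ('synthroid', 17),
--     ('prednisone', 18),
--     ('methylprednisolone', 18),
--     ('dexamethasone', 18),
--     ('hydrocortisone', 18),
--     ('contraceptive', 19),
--     ('levonorgestrel', 19),
--     ('ethinyl estradiol', 19),
--     ('norethindrone', 19),
-- ]
--
-- def _categorize_drug(description: str) -> str:
--     """Categorize a drug based on its description."""
--     desc_lower = description.lower()
--     best = None
--     for kw, i in _KEYWORD_INDEX:
--         if kw in desc_lower and (best is None or i < best):
--             best = i
--     return _CLASS_NAMES[best] if best is not None else "Other"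
-- ===== Notes on version B (the rewrite author's own statement) =====
-- stated objective: alternative
-- what changed: Replaced the ordered per-class nested scan with early return by one flat keyword->class-index list scanned once, keeping the minimum matched index and looking the class name up in a separate name list.
import Mathlib
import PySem

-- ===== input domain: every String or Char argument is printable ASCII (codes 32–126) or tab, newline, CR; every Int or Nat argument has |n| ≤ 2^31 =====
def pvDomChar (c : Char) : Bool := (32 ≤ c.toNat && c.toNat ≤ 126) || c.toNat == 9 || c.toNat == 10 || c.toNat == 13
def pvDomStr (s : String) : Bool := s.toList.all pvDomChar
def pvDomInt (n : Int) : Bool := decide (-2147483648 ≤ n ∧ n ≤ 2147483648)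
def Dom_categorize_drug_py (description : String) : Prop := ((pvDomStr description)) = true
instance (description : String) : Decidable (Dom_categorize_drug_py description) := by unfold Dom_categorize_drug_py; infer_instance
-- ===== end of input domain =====

-- B replaces A's ordered per-class scan with early return by one flat pass over a keyword->index list keeping the minimum matched index (objective: alternative decomposition, same cost).

-- ===== PORT A =====
def drugClassesA : List (List String × String) := [
  (["lisinopril", "enalapril", "ramipril", "captopril", "benazepril"], "ACE Inhibitor"),
  (["losartan", "valsartan", "irbesartan", "olmesartan", "candesartan"], "ARB"),
  (["metoprolol", "atenolol", "carvedilol", "propranolol", "bisoprolol"], "Beta Blocker"),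
  (["amlodipine", "nifedipine", "diltiazem", "verapamil"], "Calcium Channel Blocker"),
  (["hydrochlorothiazide", "furosemide", "spironolactone", "chlorthalidone", "bumetanide"], "Diuretic"),
  (["atorvastatin", "simvastatin", "rosuvastatin", "pravastatin", "lovastatin"], "Statin"),
  (["metformin", "glipizide", "glyburide", "pioglitazone", "sitagliptin", "empagliflozin"], "Antidiabetic"),
  (["insulin"], "Insulin"),
  (["warfarin", "apixaban", "rivaroxaban", "dabigatran", "heparin", "enoxaparin"], "Anticoagulant"),
  (["aspirin", "clopidogrel", "ticagrelor", "prasugrel"], "Antiplatelet"),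
  (["omeprazole", "pantoprazole", "esomeprazole", "lansoprazole", "rabeprazole"], "Proton Pump Inhibitor"),
  (["sertraline", "fluoxetine", "escitalopram", "citalopram", "paroxetine"], "SSRI Antidepressant"),
  (["gabapentin", "pregabalin", "topiramate", "levetiracetam", "carbamazepine", "phenytoin", "valproic"], "Anticonvulsant"),
  (["albuterol", "salbutamol", "ipratropium", "tiotropium", "budesonide", "fluticasone"], "Respiratory"),
  (["penicillin", "amoxicillin", "azithromycin", "ciprofloxacin", "levofloxacin", "doxycycline", "cephalexin"], "Antibiotic"),
  (["acetaminophen", "ibuprofen", "naproxen", "diclofenac", "meloxicam", "celecoxib"], "Analgesic/NSAID"),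
  (["oxycodone", "hydrocodone", "morphine", "fentanyl", "tramadol", "codeine"], "Opioid"),
  (["levothyroxine", "synthroid"], "Thyroid Hormone"),
  (["prednisone", "methylprednisolone", "dexamethasone", "hydrocortisone"], "Corticosteroid"),
  (["contraceptive", "levonorgestrel", "ethinyl estradiol", "norethindrone"], "Contraceptive"),
]

def catLoopA (dl : String) : List (List String × String) → String
  | [] => "Other"
  | (kws, drug_class) :: rest =>
      if kws.any (fun kw => PySem.Str.isIn kw dl) then drug_class else catLoopA dl rest

def categorize_drug_py (description : String) : String :=
  catLoopA (PySem.Str.lower description) drugClassesA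

-- ===== PORT B =====
def classNamesB : List String := ["ACE Inhibitor", "ARB", "Beta Blocker", "Calcium Channel Blocker", "Diuretic", "Statin", "Antidiabetic", "Insulin", "Anticoagulant", "Antiplatelet", "Proton Pump Inhibitor", "SSRI Antidepressant", "Anticonvulsant", "Respiratory", "Antibiotic", "Analgesic/NSAID", "Opioid", "Thyroid Hormone", "Corticosteroid", "Contraceptive"]

def keywordIndexB : List (String × Nat) := [
  ("lisinopril", 0),
  ("enalapril", 0),
  ("ramipril", 0),
  ("captopril", 0),
  ("benazepril", 0),
  ("losartan", 1),
  ("valsartan", 1),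
  ("irbesartan", 1),
  ("olmesartan", 1),
  ("candesartan", 1),
  ("metoprolol", 2),
  ("atenolol", 2),
  ("carvedilol", 2),
  ("propranolol", 2),
  ("bisoprolol", 2),
  ("amlodipine", 3),
  ("nifedipine", 3),
  ("diltiazem", 3),
  ("verapamil", 3),
  ("hydrochlorothiazide", 4),
  ("furosemide", 4),
  ("spironolactone", 4),
  ("chlorthalidone", 4),
  ("bumetanide", 4),
  ("atorvastatin", 5),
  ("simvastatin", 5),
  ("rosuvastatin", 5),
  ("pravastatin", 5),
  ("lovastatin", 5),
  ("metformin", 6),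
  ("glipizide", 6),
  ("glyburide", 6),
  ("pioglitazone", 6),
  ("sitagliptin", 6),
  ("empagliflozin", 6),
  ("insulin", 7),
  ("warfarin", 8),
  ("apixaban", 8),
  ("rivaroxaban", 8),
  ("dabigatran", 8),
  ("heparin", 8),
  ("enoxaparin", 8),
  ("aspirin", 9),
  ("clopidogrel", 9),
  ("ticagrelor", 9),
  ("prasugrel", 9),
  ("omeprazole", 10),
  ("pantoprazole", 10),
  ("esomeprazole", 10),
  ("lansoprazole", 10),
  ("rabeprazole", 10),
  ("sertraline", 11),
  ("fluoxetine", 11),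
  ("escitalopram", 11),
  ("citalopram", 11),
  ("paroxetine", 11),
  ("gabapentin", 12),
  ("pregabalin", 12),
  ("topiramate", 12),
  ("levetiracetam", 12),
  ("carbamazepine", 12),
  ("phenytoin", 12),
  ("valproic", 12),
  ("albuterol", 13),
  ("salbutamol", 13),
  ("ipratropium", 13),
  ("tiotropium", 13),
  ("budesonide", 13),
  ("fluticasone", 13),
  ("penicillin", 14),
  ("amoxicillin", 14),
  ("azithromycin", 14),
  ("ciprofloxacin", 14),
  ("levofloxacin", 14),
  ("doxycycline", 14),
  ("cephalexin", 14),
  ("acetaminophen", 15),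
  ("ibuprofen", 15),
  ("naproxen", 15),
  ("diclofenac", 15),
  ("meloxicam", 15),
  ("celecoxib", 15),
  ("oxycodone", 16),
  ("hydrocodone", 16),
  ("morphine", 16),
  ("fentanyl", 16),
  ("tramadol", 16),
  ("codeine", 16),
  ("levothyroxine", 17),
  ("synthroid", 17),
  ("prednisone", 18),
  ("methylprednisolone", 18),
  ("dexamethasone", 18),
  ("hydrocortisone", 18),
  ("contraceptive", 19),
  ("levonorgestrel", 19),
  ("ethinyl estradiol", 19),
  ("norethindrone", 19)]

def stepB (dl : String) (best : Option Nat) (p : String × Nat) : Option Nat :=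
  if PySem.Str.isIn p.1 dl && (best.isNone || decide (p.2 < best.getD 0)) then some p.2 else best

def categorize_drug_py_alt (description : String) : String :=
  let dl := PySem.Str.lower description
  match keywordIndexB.foldl (stepB dl) none with
  | some i => ((classNamesB[i]?).getD "Other")  -- _CLASS_NAMES[best]; i is always in range here
  | none => "Other"

-- ===== PRECONDITION & SPEC =====
def Spec_categorize_drug_py (description : String) (out : String) : Prop := out = categorize_drug_py_alt description
instance (description : String) (out : String) : Decidable (Spec_categorize_drug_py description out) := by unfold Spec_categorize_drug_py; infer_instance

-- ===== CLAIM (what is proved, stated in full; the proofs are below) =====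
def Claim_equal_categorize_drug_py : Prop := ∀ (description : String), Dom_categorize_drug_py description → Spec_categorize_drug_py description (categorize_drug_py description)

-- ===== LEMMAS AND PROOFS =====

-- All loop lemmas are stated over an opaque match predicate `m`; at the end `m`
-- is instantiated with the substring test on the lowered description.

def stepG (m : String → Bool) (best : Option Nat) (p : String × Nat) : Option Nat :=
  if m p.1 && (best.isNone || decide (p.2 < best.getD 0)) then some p.2 else best

def catLoopG (m : String → Bool) : List (List String × String) → String
  | [] => "Other"
  | (kws, drug_class) :: rest => if kws.any m then drug_class else catLoopG m rest

-- flatten a grouped table into (keyword, absolute index) pairs, starting at offset `off`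
def flatOff (off : Nat) : List (List String × String) → List (String × Nat)
  | [] => []
  | (kws, _) :: rest => kws.map (fun kw => (kw, off)) ++ flatOff (off + 1) rest

-- first matched group index, absolute
def firstIdxG (m : String → Bool) (off : Nat) : List (List String × String) → Option Nat
  | [] => none
  | (kws, _) :: rest => if kws.any m then some off else firstIdxG m (off + 1) rest

lemma stepB_eq (dl : String) : stepB dl = stepG (fun kw => PySem.Str.isIn kw dl) := rfl

lemma catLoopA_eq_G (dl : String) (L : List (List String × String)) :
    catLoopA dl L = catLoopG (fun kw => PySem.Str.isIn kw dl) L := by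
  induction L with
  | nil => rfl
  | cons g rest ih =>
      obtain ⟨kws, c⟩ := g
      simp only [catLoopA, catLoopG, ih]

lemma mem_flatOff_ge (L : List (List String × String)) (off : Nat)
    (p : String × Nat) (hp : p ∈ flatOff off L) : off ≤ p.2 := by
  induction L generalizing off with
  | nil => simp [flatOff] at hp
  | cons g rest ih =>
      obtain ⟨kws, c⟩ := g
      simp only [flatOff, List.mem_append, List.mem_map] at hp
      rcases hp with ⟨kw, _, rfl⟩ | h
      · exact le_refl _
      · exact Nat.le_of_succ_le (ih (off + 1) h)

lemma foldl_step_some (m : String → Bool) (l : List (String × Nat)) (j : Nat)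
    (h : ∀ p ∈ l, j ≤ p.2) : l.foldl (stepG m) (some j) = some j := by
  induction l with
  | nil => rfl
  | cons p rest ih =>
      have hj := h p (by simp)
      have hs : stepG m (some j) p = some j := by
        simp [stepG, Nat.not_lt.mpr hj]
      rw [List.foldl_cons, hs]
      exact ih (fun q hq => h q (by simp [hq]))

lemma foldl_group (m : String → Bool) (kws : List String) (i : Nat) :
    (kws.map (fun kw => (kw, i))).foldl (stepG m) none
      = if kws.any m then some i else none := by
  induction kws with
  | nil => rfl
  | cons kw rest ih =>
      cases h : m kw with
      | true =>
          have hs : stepG m none (kw, i) = some i := by simp [stepG, h]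
          rw [List.map_cons, List.foldl_cons, hs,
            foldl_step_some m _ i (by
              intro p hp
              simp only [List.mem_map] at hp
              obtain ⟨_, _, rfl⟩ := hp
              exact le_refl _)]
          simp [List.any_cons, h]
      | false =>
          have hs : stepG m none (kw, i) = none := by simp [stepG, h]
          rw [List.map_cons, List.foldl_cons, hs, ih]
          simp [List.any_cons, h]

lemma foldl_flatOff (m : String → Bool) (L : List (List String × String)) (off : Nat) :
    (flatOff off L).foldl (stepG m) none = firstIdxG m off L := by
  induction L generalizing off with
  | nil => rfl
  | cons g rest ih =>
      obtain ⟨kws, c⟩ := g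
      rw [flatOff, List.foldl_append, foldl_group]
      cases h : kws.any m with
      | true =>
          rw [if_pos rfl,
            foldl_step_some m _ off
              (fun p hp => Nat.le_of_succ_le (mem_flatOff_ge rest (off + 1) p hp))]
          simp only [firstIdxG, h, if_pos]
      | false =>
          rw [if_neg (by simp), ih (off + 1)]
          simp only [firstIdxG, h, Bool.false_eq_true, if_false]

lemma firstIdxG_ge (m : String → Bool) (L : List (List String × String)) (off i : Nat)
    (h : firstIdxG m off L = some i) : off ≤ i := by
  induction L generalizing off with
  | nil => simp [firstIdxG] at h
  | cons g rest ih =>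
      obtain ⟨kws, c⟩ := g
      cases hm : kws.any m with
      | true =>
          simp only [firstIdxG, hm, if_pos, Option.some.injEq] at h
          omega
      | false =>
          simp only [firstIdxG, hm, Bool.false_eq_true, if_false] at h
          exact Nat.le_of_succ_le (ih (off + 1) h)

lemma catLoopG_eq_firstIdxG (m : String → Bool) (L : List (List String × String)) (off : Nat) :
    catLoopG m L
      = match firstIdxG m off L with
        | some i => ((L.map Prod.snd)[i - off]?).getD "Other"
        | none => "Other" := by
  induction L generalizing off with
  | nil => rfl
  | cons g rest ih =>
      obtain ⟨kws, c⟩ := g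
      cases hm : kws.any m with
      | true =>
          simp only [catLoopG, firstIdxG, hm, if_pos, List.map_cons, Nat.sub_self,
            List.getElem?_cons_zero, Option.getD_some]
      | false =>
          simp only [catLoopG, firstIdxG, hm, Bool.false_eq_true, if_false]
          rw [ih (off + 1)]
          cases hfi : firstIdxG m (off + 1) rest with
          | none => rfl
          | some i =>
              have hge := firstIdxG_ge m rest (off + 1) i hfi
              simp only [List.map_cons]
              have hsub : i - off = (i - (off + 1)) + 1 := by omega
              rw [hsub, List.getElem?_cons_succ]

lemma flat_eq : flatOff 0 drugClassesA = keywordIndexB := by rfl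

lemma names_eq : drugClassesA.map Prod.snd = classNamesB := by rfl

-- ===== VERDICT (by name: the statement is the Claim_ definition above) =====
theorem categorize_drug_py_spec : Claim_equal_categorize_drug_py := by
  intro description _
  unfold Spec_categorize_drug_py categorize_drug_py categorize_drug_py_alt
  simp only [← flat_eq, stepB_eq, foldl_flatOff]
  rw [catLoopA_eq_G, catLoopG_eq_firstIdxG _ drugClassesA 0]
  cases firstIdxG (fun kw => PySem.Str.isIn kw (PySem.Str.lower description)) 0 drugClassesA with
  | none => rfl
  | some i => simp only [names_eq, Nat.sub_zero]
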